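-- pv_equiv track=rewrite | github.com/Code12naman/ACC45DAYSOFCODE-2024 | DAY4 REMOVEBAD.py | min_operations_to_make_elements_same
-- ===== SOURCE A (Python) =====
-- from collections import Counter
--
-- def min_operations_to_make_elements_same(test_cases):
--     results = []
--     for case in test_cases:
--         N, A = case
--         frequency = Counter(A)
--         max_frequency = max(frequency.values())
--         results.append(N - max_frequency)
--     return results
-- ===== SOURCE B (Python) =====
-- def min_operations_to_make_elements_same(test_cases):
--     # sort each case and scan runs of equal adjacent elements; the longest run
--     # is the count of the most common value, so the answer is n - longest run
--     results = []
--     for n, a in test_cases: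
--         s = sorted(a)
--         best = 0
--         i = 0
--         while i < len(s):
--             j = i + 1
--             while j < len(s) and s[j] == s[i]:
--                 j += 1
--             if j - i > best:
--                 best = j - i
--             i = j
--         results.append(n - best)
--     return results
-- ===== Notes on version B (the rewrite author's own statement) =====
-- stated objective: alternative
-- what changed: Replaces A's hash-based frequency counting (Counter + max of values) by sorting each case and scanning once for the longest run of equal adjacent elements, which equals the maximum frequency.
import Mathlib
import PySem

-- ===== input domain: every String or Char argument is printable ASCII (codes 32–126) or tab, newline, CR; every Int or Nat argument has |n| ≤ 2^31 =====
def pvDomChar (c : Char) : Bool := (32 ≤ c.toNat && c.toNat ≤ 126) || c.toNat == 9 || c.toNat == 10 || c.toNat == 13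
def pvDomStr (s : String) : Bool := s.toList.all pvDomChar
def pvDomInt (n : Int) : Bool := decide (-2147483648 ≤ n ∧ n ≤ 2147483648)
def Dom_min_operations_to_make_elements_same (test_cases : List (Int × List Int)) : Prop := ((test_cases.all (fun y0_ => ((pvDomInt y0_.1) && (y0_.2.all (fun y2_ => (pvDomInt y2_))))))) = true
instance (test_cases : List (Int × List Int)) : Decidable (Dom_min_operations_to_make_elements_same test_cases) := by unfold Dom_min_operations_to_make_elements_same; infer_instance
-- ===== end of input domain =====

-- B replaces A's Counter-and-values-max per case by sorting the case's list and scanning once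
-- for the longest run of equal adjacent elements (alternative algorithm; not claimed faster).


-- ===== PORT A =====
-- Transliteration of A: results loop; Counter(A); max(frequency.values()); results.append(N - max_frequency).
-- Under Pre_ (every A nonempty) max? is always `some`; the `.getD 0` marks the ValueError branch, unreachable inside Pre_.
def min_operations_to_make_elements_same (test_cases : List (Int × List Int)) : List Int :=
  test_cases.foldl (fun results case =>
    let N := case.1
    let A := case.2
    let frequency := PySem.Dict.counter A
    let max_frequency := (PySem.List.max? frequency.values (fun v => v)).getD 0
    results ++ [N - max_frequency]) []

-- ===== PORT B =====
-- Transliteration of B's run scan over the sorted list: the inner `while j < len(s) and s[j] == s[i]`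
-- consumes the run starting at i (= takeWhile on the tail), `i = j` jumps past it (= dropWhile),
-- and `best` keeps the longest run seen.
def bestRunGo (s : List Int) (best : Int) : Int :=
  match s with
  | [] => best
  | x :: t =>
    let run : Int := 1 + (t.takeWhile (fun y => y == x)).length
    bestRunGo (t.dropWhile (fun y => y == x)) (if run > best then run else best)
termination_by s.length
decreasing_by
  simpa using Nat.lt_succ_of_le (List.length_dropWhile_le _ _)

def min_operations_to_make_elements_same_alt (test_cases : List (Int × List Int)) : List Int :=
  test_cases.foldl (fun results case =>
    let s := PySem.List.sorted case.2 (fun x => x) false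
    let best := bestRunGo s 0
    results ++ [case.1 - best]) []

-- ===== PRECONDITION & SPEC =====
-- Pre_ excludes cases with an empty element list, on which A raises ValueError (max of empty Counter).
def Pre_min_operations_to_make_elements_same (test_cases : List (Int × List Int)) : Prop :=
  ∀ c ∈ test_cases, c.2 ≠ []
instance (test_cases : List (Int × List Int)) : Decidable (Pre_min_operations_to_make_elements_same test_cases) := by unfold Pre_min_operations_to_make_elements_same; infer_instance
def pvWitness_min_operations_to_make_elements_same : (List (Int × List Int)) := [(4, [1, 2, 2]), (1, [5])]

def Spec_min_operations_to_make_elements_same (test_cases : List (Int × List Int)) (out : List Int) : Prop := out = min_operations_to_make_elements_same_alt test_cases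
instance (test_cases : List (Int × List Int)) (out : List Int) : Decidable (Spec_min_operations_to_make_elements_same test_cases out) := by unfold Spec_min_operations_to_make_elements_same; infer_instance

-- ===== CLAIM (what is proved, stated in full; the proofs are below) =====
def Claim_equal_min_operations_to_make_elements_same : Prop := ∀ (test_cases : List (Int × List Int)), Dom_min_operations_to_make_elements_same test_cases → Pre_min_operations_to_make_elements_same test_cases → Spec_min_operations_to_make_elements_same test_cases (min_operations_to_make_elements_same test_cases)
-- ===== LEMMAS AND PROOFS =====

-- In a sorted tail whose elements are all ≥ x, x does not occur after the run of x's.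
lemma not_mem_dropWhile_sorted (x : Int) (t : List Int)
    (hge : ∀ y ∈ t, x ≤ y) (hp : t.Pairwise (· ≤ ·)) :
    x ∉ t.dropWhile (fun y => y == x) := by
  induction t with
  | nil => simp
  | cons y t' ih =>
    rcases List.pairwise_cons.mp hp with ⟨hy, hp'⟩
    by_cases hxy : y = x
    · subst hxy
      rw [List.dropWhile_cons_of_pos (by simp)]
      exact ih (fun z hz => hge z (List.mem_cons_of_mem _ hz)) hp'
    · rw [List.dropWhile_cons_of_neg (by simp [hxy])]
      intro hmem
      rcases List.mem_cons.mp hmem with h | h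
      · exact hxy h.symm
      · have h1 : x ≤ y := hge y (List.mem_cons_self)
        have h2 : y ≤ x := hy x h
        exact hxy (le_antisymm h2 h1)

-- Count of the head of a sorted list = 1 + length of the run of equal elements after it.
lemma count_head_sorted (x : Int) (t : List Int)
    (hge : ∀ y ∈ t, x ≤ y) (hp : t.Pairwise (· ≤ ·)) :
    (x :: t).count x = 1 + (t.takeWhile (fun y => y == x)).length := by
  have hsplit := List.takeWhile_append_dropWhile (p := fun y => y == x) (l := t)
  have htake : ∀ y ∈ t.takeWhile (fun y => y == x), x = y := by
    intro y hy
    exact (beq_iff_eq.mp (List.mem_takeWhile_imp (p := fun z => z == x) hy)).symm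
  have hdrop : (t.dropWhile (fun y => y == x)).count x = 0 :=
    List.count_eq_zero.mpr (not_mem_dropWhile_sorted x t hge hp)
  calc (x :: t).count x = 1 + t.count x := by rw [List.count_cons_self]; ring
    _ = 1 + ((t.takeWhile (fun y => y == x)).count x + (t.dropWhile (fun y => y == x)).count x) := by
        rw [← List.count_append, hsplit]
    _ = 1 + (t.takeWhile (fun y => y == x)).length := by
        rw [hdrop, List.count_eq_length.mpr htake]; ring

-- Count of a non-head value is unchanged by removing the head's run.
lemma count_ne_head (x y : Int) (t : List Int) (hxy : y ≠ x) :
    (x :: t).count y = (t.dropWhile (fun z => z == x)).count y := by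
  have hsplit := List.takeWhile_append_dropWhile (p := fun z => z == x) (l := t)
  have htake : (t.takeWhile (fun z => z == x)).count y = 0 := by
    apply List.count_eq_zero.mpr
    intro hmem
    exact hxy (by simpa using List.mem_takeWhile_imp hmem)
  calc (x :: t).count y = t.count y := List.count_cons_of_ne (Ne.symm hxy)
    _ = (t.takeWhile (fun z => z == x)).count y + (t.dropWhile (fun z => z == x)).count y := by
        rw [← List.count_append, hsplit]
    _ = (t.dropWhile (fun z => z == x)).count y := by rw [htake]; ring

-- The run scan over a sorted list: it dominates the accumulator and every value's count,
-- and its result is the accumulator or some value's count.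
lemma bestRunGo_spec_aux (n : Nat) : ∀ (s : List Int), s.length ≤ n → s.Pairwise (· ≤ ·) → ∀ (best : Int),
    best ≤ bestRunGo s best ∧
    (∀ y ∈ s, (s.count y : Int) ≤ bestRunGo s best) ∧
    (bestRunGo s best = best ∨ ∃ y ∈ s, bestRunGo s best = (s.count y : Int)) := by
  induction n with
  | zero =>
    intro s hs _ best
    rw [List.eq_nil_of_length_eq_zero (Nat.le_zero.mp hs)]
    simp [bestRunGo]
  | succ n ihn =>
    intro s hs hp best0
    match s with
    | [] => simp [bestRunGo]
    | x :: t =>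
      rcases List.pairwise_cons.mp hp with ⟨hge, hp'⟩
      have hpd : (t.dropWhile (fun y => y == x)).Pairwise (· ≤ ·) :=
        hp'.sublist (List.dropWhile_sublist _)
      have hlen : (t.dropWhile (fun y => y == x)).length ≤ n := by
        have := List.length_dropWhile_le (fun y => y == x) t
        simp at hs; omega
      obtain ⟨ub, cnts, mem⟩ := ihn (t.dropWhile (fun y => y == x)) hlen hpd
        (if (1 : Int) + (t.takeWhile (fun y => y == x)).length > best0
         then (1 : Int) + (t.takeWhile (fun y => y == x)).length else best0)
      have hxd : x ∉ t.dropWhile (fun y => y == x) := not_mem_dropWhile_sorted x t hge hp'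
      have hcx : ((x :: t).count x : Int) = 1 + (t.takeWhile (fun y => y == x)).length := by
        rw [count_head_sorted x t hge hp']; push_cast; ring
      rw [show bestRunGo (x :: t) best0
          = bestRunGo (t.dropWhile (fun y => y == x))
              (if (1 : Int) + (t.takeWhile (fun y => y == x)).length > best0
               then (1 : Int) + (t.takeWhile (fun y => y == x)).length else best0) from by
        rw [bestRunGo]]
      set run : Int := 1 + (t.takeWhile (fun y => y == x)).length with hrun
      set best' : Int := if run > best0 then run else best0 with hbest'
      have hb0 : best0 ≤ best' := by rw [hbest']; split <;> omega
      have hbr : run ≤ best' := by rw [hbest']; split <;> omega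
      have hrun1 : (1 : Int) ≤ run := by rw [hrun]; omega
      refine ⟨le_trans hb0 ub, ?_, ?_⟩
      · intro y hy
        by_cases hyx : y = x
        · subst hyx
          rw [hcx]
          exact le_trans hbr ub
        · rw [show ((x :: t).count y : Int)
              = ((t.dropWhile (fun z => z == x)).count y : Int) from by
            rw [count_ne_head x y t hyx]]
          by_cases hyd : y ∈ t.dropWhile (fun z => z == x)
          · exact cnts y hyd
          · rw [List.count_eq_zero.mpr hyd]
            have h0 : (0:Int) ≤ best' := le_trans (le_trans (by norm_num) hrun1) hbr
            exact le_trans h0 ub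
      · rcases mem with hm | ⟨y, hyd, hy⟩
        · by_cases hcond : run > best0
          · right
            refine ⟨x, List.mem_cons_self, ?_⟩
            rw [hm, hbest', if_pos hcond]
            exact hcx.symm
          · left
            rw [hm, hbest', if_neg hcond]
        · right
          have hyt : y ∈ t := (List.dropWhile_sublist _).mem hyd
          have hyx : y ≠ x := fun h => hxd (h ▸ hyd)
          refine ⟨y, List.mem_cons_of_mem _ hyt, ?_⟩
          rw [hy, count_ne_head x y t hyx]

lemma bestRunGo_spec (s : List Int) (hp : s.Pairwise (· ≤ ·)) (best : Int) :
    best ≤ bestRunGo s best ∧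
    (∀ y ∈ s, (s.count y : Int) ≤ bestRunGo s best) ∧
    (bestRunGo s best = best ∨ ∃ y ∈ s, bestRunGo s best = (s.count y : Int)) :=
  bestRunGo_spec_aux s.length s le_rfl hp best

-- For a nonempty A, A's per-case value (Counter max) equals B's per-case value (longest sorted run).
lemma case_eq (N : Int) (A : List Int) (hA : A ≠ []) :
    N - (PySem.List.max? (PySem.Dict.counter A).values (fun v => v)).getD 0
      = N - bestRunGo (PySem.List.sorted A (fun x => x) false) 0 := by
  set s := PySem.List.sorted A (fun x => x) false with hsdef
  have hperm : s.Perm A := PySem.List.sorted_perm A (fun x => x) false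
  have hp : s.Pairwise (· ≤ ·) := PySem.List.sorted_pairwise A (fun x => x)
  have hs : s ≠ [] := by
    intro h
    exact hA (List.Perm.nil_eq (h ▸ hperm)).symm
  obtain ⟨ub, cnts, mem⟩ := bestRunGo_spec s hp 0
  obtain ⟨z, hz⟩ := List.exists_mem_of_ne_nil s hs
  have hB1 : (1 : Int) ≤ bestRunGo s 0 := by
    have := cnts z hz
    have hzc : 1 ≤ s.count z := List.count_pos_iff.mpr hz
    omega
  obtain ⟨y, hys, hBy⟩ : ∃ y ∈ s, bestRunGo s 0 = (s.count y : Int) := by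
    rcases mem with h | h
    · omega
    · exact h
  have hvals : (PySem.Dict.counter A).values
      = (PySem.Set.ofList A).map (fun k => (A.count k : Int)) := by
    show ((PySem.Dict.counter A).items.map Prod.snd) = _
    rw [PySem.Dict.items_counter]
    simp
  have hLne : (PySem.Set.ofList A).map (fun k => (A.count k : Int)) ≠ [] := by
    intro h
    obtain ⟨a, t, rfl⟩ := List.exists_cons_of_ne_nil hA
    have : a ∈ PySem.Set.ofList (a :: t) := (PySem.Set.mem_ofList _ _).mpr List.mem_cons_self
    rw [List.map_eq_nil_iff.mp h] at this
    simp at this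
  obtain ⟨m, hm⟩ : ∃ m, PySem.List.max?
      ((PySem.Set.ofList A).map (fun k => (A.count k : Int))) (fun v => v) = some m := by
    cases h : PySem.List.max? ((PySem.Set.ofList A).map (fun k => (A.count k : Int))) (fun v => v) with
    | none => exact absurd ((PySem.List.max?_eq_none_iff _ _).mp h) hLne
    | some m => exact ⟨m, rfl⟩
  obtain ⟨k, hk, hmk⟩ := List.mem_map.mp (PySem.List.max?_mem hm)
  have hkA : k ∈ A := (PySem.Set.mem_ofList _ _).mp hk
  have hmB : m ≤ bestRunGo s 0 := by
    rw [← hmk, show (A.count k : Int) = (s.count k : Int) from by rw [hperm.count_eq]]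
    exact cnts k (hperm.mem_iff.mpr hkA)
  have hBm : bestRunGo s 0 ≤ m := by
    rw [hBy, show (s.count y : Int) = (A.count y : Int) from by rw [hperm.count_eq]]
    exact PySem.List.max?_isMax hm _ (List.mem_map.mpr ⟨y, (PySem.Set.mem_ofList _ _).mpr (hperm.subset hys), rfl⟩)
  rw [hvals, hm]
  simp [le_antisymm hmB hBm]

theorem min_operations_to_make_elements_same_spec : Claim_equal_min_operations_to_make_elements_same := by
  intro test_cases _ hpre
  show _ = _
  unfold min_operations_to_make_elements_same min_operations_to_make_elements_same_alt
  rw [PySem.List.foldl_append_singleton_eq_map, PySem.List.foldl_append_singleton_eq_map]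
  simp only [List.nil_append]
  exact List.map_congr_left (fun c hc => case_eq c.1 c.2 (hpre c hc))
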